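-- pv_equiv track=rewrite | github.com/BestUser14/Advent_of_Code | Advent of Code/2024/Day2/part2.py | double_test
-- ===== SOURCE A (Python) =====
-- def test(array):
--     greater=0
--     lesser=0
--     for i in range(len(array)-1):
--         if array[i]>array[i+1]:
--             greater+=1
--         if array[i]<array[i+1]:
--             lesser+=1
--     if greater!=len(array)-1 and lesser!=len(array)-1:
--         return 0
--     for i in range(len(array)-1):
--         if abs(array[i]-array[i+1])>3 or abs(array[i]-array[i+1])<=0:
--             return 0
--     return 1
--
-- def double_test(array):
--     safe=0
--     temp=[]
--     for i in range(len(array)):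
--         temp=array.copy()
--         temp.pop(i)
--         safe+=test(temp)
--     if safe>0:
--         return 1
--     return 0
-- ===== SOURCE B (Python) =====
-- # B: single scan finds the first bad adjacent pair per direction; only the two
-- # involved removal positions (or the last element when already safe) are tested.
-- def first_bad(arr, sign):
--     # index of first adjacent pair that is not a valid step in direction `sign`
--     for i, (a, b) in enumerate(zip(arr, arr[1:])):
--         d = (b - a) * sign
--         if not (1 <= d <= 3):
--             return i
--     return None
--
--
-- def safe(arr):
--     return first_bad(arr, 1) is None or first_bad(arr, -1) is None
--
--
-- def double_test(array):
--     n = len(array)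
--     if n <= 1:
--         return 0
--     cands = []
--     i = first_bad(array, 1)
--     if i is None:
--         cands.append(n - 1)
--     else:
--         cands += [i, i + 1]
--     j = first_bad(array, -1)
--     if j is None:
--         cands.append(n - 1)
--     else:
--         cands += [j, j + 1]
--     return 1 if any(safe(array[:k] + array[k + 1:]) for k in cands) else 0
-- ===== Notes on version B (the rewrite author's own statement) =====
-- stated objective: faster
-- what changed: Instead of testing the removal of every index with a full rescan (quadratic), B scans once per direction to the first invalid adjacent pair and tests only the removal of the two elements of that pair (or of the last element when the array is already monotone-valid), which is provably sufficient.
import Mathlib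
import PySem

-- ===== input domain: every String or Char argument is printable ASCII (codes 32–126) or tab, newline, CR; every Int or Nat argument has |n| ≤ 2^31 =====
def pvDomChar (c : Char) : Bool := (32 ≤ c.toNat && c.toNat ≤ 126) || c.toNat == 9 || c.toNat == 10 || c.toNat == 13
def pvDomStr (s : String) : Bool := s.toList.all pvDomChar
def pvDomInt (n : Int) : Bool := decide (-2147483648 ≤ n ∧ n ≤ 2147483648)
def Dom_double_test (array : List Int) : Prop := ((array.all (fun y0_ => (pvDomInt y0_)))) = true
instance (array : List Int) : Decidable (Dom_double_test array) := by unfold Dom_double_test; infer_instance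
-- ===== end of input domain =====

-- B replaces A's "try every removal" O(n^2) scan by a single scan per direction to the
-- first bad adjacent pair, testing only the two involved removal positions (asymptotically faster).

-- ===== PORT A =====
-- helper `test` of A, transliterated
def pvTest (array : List Int) : Int :=
  let gl := (PySem.List.pyRange 0 ((array.length : Int) - 1) 1).foldl
    (fun (p : Int × Int) i =>
      ((if PySem.List.pyGetD array i 0 > PySem.List.pyGetD array (i + 1) 0 then p.1 + 1 else p.1),
       (if PySem.List.pyGetD array i 0 < PySem.List.pyGetD array (i + 1) 0 then p.2 + 1 else p.2)))
    (0, 0)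
  if gl.1 ≠ (array.length : Int) - 1 ∧ gl.2 ≠ (array.length : Int) - 1 then 0
  else if (PySem.List.pyRange 0 ((array.length : Int) - 1) 1).any
      (fun i => decide (3 < |PySem.List.pyGetD array i 0 - PySem.List.pyGetD array (i + 1) 0| ∨
                        |PySem.List.pyGetD array i 0 - PySem.List.pyGetD array (i + 1) 0| ≤ 0))
    then 0 else 1

def double_test (array : List Int) : Int :=
  let safe := (PySem.List.pyRange 0 (array.length : Int) 1).foldl
    (fun s i =>
      match PySem.List.pop? array i with
      | some (_, temp) => s + pvTest temp
      | none => s) 0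
  if safe > 0 then 1 else 0

-- ===== PORT B =====
def pvGoodStep (sign a b : Int) : Bool := decide (1 ≤ (b - a) * sign ∧ (b - a) * sign ≤ 3)

-- first index whose adjacent pair is not a valid step in direction `sign`
def pvFirstBad (sign : Int) : List Int → Option Nat
  | a :: b :: t => if pvGoodStep sign a b then (pvFirstBad sign (b :: t)).map (· + 1) else some 0
  | _ => none

def pvSafe (arr : List Int) : Bool := (pvFirstBad 1 arr).isNone || (pvFirstBad (-1) arr).isNone

-- array[:k] + array[k+1:]
def pvRemoved (arr : List Int) (k : Nat) : List Int :=
  PySem.List.slice arr none (some (k : Int)) ++ PySem.List.slice arr (some ((k : Int) + 1)) none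

def double_test_alt (array : List Int) : Int :=
  let n := array.length
  if n ≤ 1 then 0
  else
    let cands :=
      (match pvFirstBad 1 array with
       | none => [n - 1]
       | some i => [i, i + 1]) ++
      (match pvFirstBad (-1) array with
       | none => [n - 1]
       | some j => [j, j + 1])
    if cands.any (fun k => pvSafe (pvRemoved array k)) then 1 else 0

-- ===== PRECONDITION & SPEC =====
def Spec_double_test (array : List Int) (out : Int) : Prop := out = double_test_alt array
instance (array : List Int) (out : Int) : Decidable (Spec_double_test array out) := by unfold Spec_double_test; infer_instance

-- ===== CLAIM (what is proved, stated in full; the proofs are below) =====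
def Claim_equal_double_test : Prop := ∀ (array : List Int), Dom_double_test array → Spec_double_test array (double_test array)

-- ===== LEMMAS AND PROOFS =====

-- all adjacent pairs of l satisfy p
def PairsOK (p : Int → Int → Bool) (l : List Int) : Prop :=
  ∀ i : Nat, i + 1 < l.length → p (l.getD i 0) (l.getD (i + 1) 0) = true

-- semantic target both programs are reduced to
def goodB (l : List Int) : Bool :=
  decide (2 ≤ l.length) && (List.range l.length).any (fun k => pvSafe (l.eraseIdx k))

theorem pairsOK_nil (p : Int → Int → Bool) : PairsOK p [] := by
  intro i h; simp at h

theorem pairsOK_singleton (p : Int → Int → Bool) (a : Int) : PairsOK p [a] := by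
  intro i h; simp at h

theorem pairsOK_cons (p : Int → Int → Bool) (a b : Int) (t : List Int) :
    PairsOK p (a :: b :: t) ↔ p a b = true ∧ PairsOK p (b :: t) := by
  constructor
  · intro h
    refine ⟨h 0 (by simp), ?_⟩
    intro i hi
    have := h (i + 1) (by simpa using Nat.succ_lt_succ hi)
    simpa using this
  · rintro ⟨hab, h⟩ i hi
    cases i with
    | zero => simpa using hab
    | succ j => simpa using h j (by simpa using Nat.lt_of_succ_lt_succ hi)

theorem pvFirstBad_eq_none_iff (s : Int) (l : List Int) :
    pvFirstBad s l = none ↔ PairsOK (pvGoodStep s) l := by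
  induction l with
  | nil => simp [pvFirstBad, pairsOK_nil]
  | cons a t ih =>
    cases t with
    | nil => simp [pvFirstBad, pairsOK_singleton]
    | cons b t' =>
      rw [pairsOK_cons, pvFirstBad]
      by_cases hg : pvGoodStep s a b = true
      · simp [hg, ih]
      · simp [hg]

theorem pvFirstBad_eq_some (s : Int) (l : List Int) (i : Nat)
    (h : pvFirstBad s l = some i) :
    i + 1 < l.length ∧ pvGoodStep s (l.getD i 0) (l.getD (i + 1) 0) = false := by
  induction l generalizing i with
  | nil => simp [pvFirstBad] at h
  | cons a t ih =>
    cases t with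
    | nil => simp [pvFirstBad] at h
    | cons b t' =>
      rw [pvFirstBad] at h
      by_cases hg : pvGoodStep s a b = true
      · simp [hg] at h
        obtain ⟨j, hj, rfl⟩ := h
        obtain ⟨h1, h2⟩ := ih j hj
        refine ⟨by simpa using Nat.succ_lt_succ h1, by simpa using h2⟩
      · simp [hg] at h
        subst h
        exact ⟨by simp, by simpa using hg⟩

theorem pvSafe_iff (l : List Int) :
    pvSafe l = true ↔ PairsOK (pvGoodStep 1) l ∨ PairsOK (pvGoodStep (-1)) l := by
  simp [pvSafe, Option.isNone_iff_eq_none, pvFirstBad_eq_none_iff]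

-- a bad pair at (i, i+1) survives removing any index other than i or i+1
theorem bad_pair_survives (p : Int → Int → Bool) (l : List Int) (i k : Nat)
    (hi : i + 1 < l.length)
    (hbad : p (l.getD i 0) (l.getD (i + 1) 0) = false)
    (hki : k ≠ i) (hki' : k ≠ i + 1) :
    ¬ PairsOK p (l.eraseIdx k) := by
  intro h
  have hlen : (l.eraseIdx k).length = if k < l.length then l.length - 1 else l.length :=
    List.length_eraseIdx
  rcases Nat.lt_or_ge k i with hk | hk
  · -- removal strictly before the pair: it sits at (i-1, i) afterwards
    have hi1 : i - 1 + 1 < (l.eraseIdx k).length := by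
      rw [hlen]; split <;> omega
    have := h (i - 1) hi1
    have hlt : i - 1 + 1 < (l.eraseIdx k).length := hi1
    rw [List.getD_eq_getElem _ _ (by omega), List.getD_eq_getElem _ _ hlt,
      List.getElem_eraseIdx, List.getElem_eraseIdx] at this
    rw [dif_neg (by omega), dif_neg (by omega)] at this
    have e1 : i - 1 + 1 = i := by omega
    simp only [e1] at this
    rw [List.getD_eq_getElem _ _ hi, List.getD_eq_getElem _ _ (by omega)] at hbad
    rw [this] at hbad; simp at hbad
  · -- removal strictly after the pair: it still sits at (i, i+1)
    have hk2 : i + 1 < k := by omega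
    have hi1 : i + 1 < (l.eraseIdx k).length := by
      rw [hlen]; split <;> omega
    have := h i hi1
    rw [List.getD_eq_getElem _ _ (by omega), List.getD_eq_getElem _ _ hi1,
      List.getElem_eraseIdx, List.getElem_eraseIdx] at this
    rw [dif_pos (by omega), dif_pos (by omega)] at this
    rw [List.getD_eq_getElem _ _ hi, List.getD_eq_getElem _ _ (by omega)] at hbad
    rw [this] at hbad; simp at hbad

theorem pairsOK_eraseIdx_last (p : Int → Int → Bool) (l : List Int)
    (h : PairsOK p l) : PairsOK p (l.eraseIdx (l.length - 1)) := by
  intro i hi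
  have hlen : (l.eraseIdx (l.length - 1)).length = if l.length - 1 < l.length then l.length - 1 else l.length :=
    List.length_eraseIdx
  have hlt : i + 1 < l.length - 1 := by
    rcases Nat.eq_zero_or_pos l.length with h0 | h0
    · have hnil : l = [] := List.length_eq_zero_iff.mp h0
      subst hnil; simp at hi
    · rw [hlen, if_pos (by omega)] at hi; omega
  have := h i (by omega)
  rw [List.getD_eq_getElem _ _ hi, List.getD_eq_getElem _ _ (Nat.lt_of_succ_lt hi),
    List.getElem_eraseIdx, List.getElem_eraseIdx, dif_pos (by omega), dif_pos (by omega)]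
  rw [List.getD_eq_getElem _ _ (by omega : i + 1 < l.length), List.getD_eq_getElem _ _ (by omega : i < l.length)] at this
  exact this

theorem pvRemoved_eq (l : List Int) (k : Nat) : pvRemoved l k = l.eraseIdx k := by
  have : ((k : Int) + 1) = ((k + 1 : Nat) : Int) := by push_cast; ring
  rw [pvRemoved, PySem.List.slice_to_natCast, this, PySem.List.slice_from_natCast,
    List.eraseIdx_eq_take_drop_succ]

theorem foldl_ite_count {α : Type} (q : α → Prop) [DecidablePred q] (xs : List α) (a : Int) :
    xs.foldl (fun s k => if q k then s + 1 else s) a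
      = a + ((xs.countP (fun k => decide (q k)) : Nat) : Int) := by
  induction xs generalizing a with
  | nil => simp
  | cons x t ih => by_cases h : q x <;> simp [h, ih] <;> ring

theorem step_iff_pos (a b : Int) :
    (a < b ∧ (|a - b| ≤ 3 ∧ 0 < |a - b|)) ↔ pvGoodStep 1 a b = true := by
  have h1 : (b - a) * 1 = b - a := by ring
  simp only [pvGoodStep, decide_eq_true_eq, h1]
  rcases abs_cases (a - b) with ⟨he, _⟩ | ⟨he, _⟩ <;> rw [he] <;> omega

theorem step_iff_neg (a b : Int) :
    (b < a ∧ (|a - b| ≤ 3 ∧ 0 < |a - b|)) ↔ pvGoodStep (-1) a b = true := by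
  have h1 : (b - a) * (-1) = a - b := by ring
  simp only [pvGoodStep, decide_eq_true_eq, h1]
  rcases abs_cases (a - b) with ⟨he, _⟩ | ⟨he, _⟩ <;> rw [he] <;> omega

theorem pvTest_eq (l : List Int) :
    pvTest l = if 1 ≤ l.length ∧ pvSafe l = true then 1 else 0 := by
  cases l with
  | nil => decide
  | cons x t =>
    simp only [pvTest]
    have hm : (((x :: t).length : Int)) - 1 = ((t.length : Nat) : Int) := by
      simp only [List.length_cons]; push_cast; ring
    have hcast : ∀ k : Nat, ((k : Int) + 1) = (((k + 1 : Nat) : Nat) : Int) := by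
      intro k; push_cast; ring
    rw [hm, PySem.List.pyRange_zero_nat, List.foldl_map, List.any_map]
    simp only [Function.comp_def, hcast, PySem.List.pyGetD_natCast]
    rw [PySem.List.foldl_prod_mk
      (f := fun s (k : Nat) => if (x :: t).getD k 0 > (x :: t).getD (k + 1) 0 then s + 1 else s)
      (g := fun s (k : Nat) => if (x :: t).getD k 0 < (x :: t).getD (k + 1) 0 then s + 1 else s)]
    rw [foldl_ite_count (fun k => (x :: t).getD k 0 > (x :: t).getD (k + 1) 0),
        foldl_ite_count (fun k => (x :: t).getD k 0 < (x :: t).getD (k + 1) 0)]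
    set L := x :: t with hL
    set m := t.length with hmdef
    set cg := (List.range m).countP (fun k => decide (L.getD k 0 > L.getD (k + 1) 0)) with hcg
    set cl := (List.range m).countP (fun k => decide (L.getD k 0 < L.getD (k + 1) 0)) with hcl
    have hcgle : cg ≤ m := le_trans List.countP_le_length (by simp)
    have hclle : cl ≤ m := le_trans List.countP_le_length (by simp)
    have hlen : L.length = m + 1 := by simp [hL, hmdef]
    have hallg : cg = m ↔ ∀ k, k < m → L.getD k 0 > L.getD (k + 1) 0 := by
      have h := List.countP_eq_length
        (p := fun k : Nat => decide (L.getD k 0 > L.getD (k + 1) 0)) (l := List.range m)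
      simp only [List.length_range, List.mem_range, decide_eq_true_eq] at h
      rw [hcg]; exact h
    have halll : cl = m ↔ ∀ k, k < m → L.getD k 0 < L.getD (k + 1) 0 := by
      have h := List.countP_eq_length
        (p := fun k : Nat => decide (L.getD k 0 < L.getD (k + 1) 0)) (l := List.range m)
      simp only [List.length_range, List.mem_range, decide_eq_true_eq] at h
      rw [hcl]; exact h
    have hany : ((List.range m).any fun k =>
        decide (3 < |L.getD k 0 - L.getD (k + 1) 0| ∨ |L.getD k 0 - L.getD (k + 1) 0| ≤ 0)) = true
        ↔ ∃ k, k < m ∧ (3 < |L.getD k 0 - L.getD (k + 1) 0| ∨ |L.getD k 0 - L.getD (k + 1) 0| ≤ 0) := by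
      simp [List.any_eq_true, List.mem_range]
    have hsafe : pvSafe L = true ↔
        (∀ k, k < m → pvGoodStep 1 (L.getD k 0) (L.getD (k + 1) 0) = true) ∨
        (∀ k, k < m → pvGoodStep (-1) (L.getD k 0) (L.getD (k + 1) 0) = true) := by
      rw [pvSafe_iff]
      unfold PairsOK
      rw [hlen]
      constructor
      · rintro (h | h)
        · exact Or.inl fun k hk => h k (by omega)
        · exact Or.inr fun k hk => h k (by omega)
      · rintro (h | h)
        · exact Or.inl fun k hk => h k (by omega)
        · exact Or.inr fun k hk => h k (by omega)
    have hone : 1 ≤ L.length := by rw [hlen]; omega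
    have key : (¬((0 + (cg : Int) ≠ (m : Int) ∧ 0 + (cl : Int) ≠ (m : Int))) ∧
        ¬(((List.range m).any fun k =>
          decide (3 < |L.getD k 0 - L.getD (k + 1) 0| ∨ |L.getD k 0 - L.getD (k + 1) 0| ≤ 0)) = true))
        ↔ pvSafe L = true := by
      rw [hany, hsafe]
      have hg' : 0 + (cg : Int) = (m : Int) ↔ cg = m := by omega
      have hl' : 0 + (cl : Int) = (m : Int) ↔ cl = m := by omega
      constructor
      · rintro ⟨h1, h2⟩
        push_neg at h2
        rcases not_and_or.mp h1 with h | h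
        · have hg := hallg.mp (hg'.mp (not_not.mp h))
          exact Or.inr fun k hk => (step_iff_neg _ _).mp ⟨hg k hk, h2 k hk⟩
        · have hl := halll.mp (hl'.mp (not_not.mp h))
          exact Or.inl fun k hk => (step_iff_pos _ _).mp ⟨hl k hk, h2 k hk⟩
      · rintro (h | h)
        · constructor
          · rw [not_and_or, not_not, not_not, hg', hl']
            exact Or.inr (halll.mpr fun k hk => ((step_iff_pos _ _).mpr (h k hk)).1)
          · push_neg
            exact fun k hk => ((step_iff_pos _ _).mpr (h k hk)).2
        · constructor
          · rw [not_and_or, not_not, not_not, hg', hl']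
            exact Or.inl (hallg.mpr fun k hk => ((step_iff_neg _ _).mpr (h k hk)).1)
          · push_neg
            exact fun k hk => ((step_iff_neg _ _).mpr (h k hk)).2
    by_cases hS : pvSafe L = true
    · have hk := key.mpr hS
      rw [if_neg hk.1, if_neg hk.2, if_pos ⟨hone, hS⟩]
    · have hk : ¬(¬(0 + (cg : Int) ≠ (m : Int) ∧ 0 + (cl : Int) ≠ (m : Int)) ∧
          ¬(((List.range m).any fun k =>
            decide (3 < |L.getD k 0 - L.getD (k + 1) 0| ∨ |L.getD k 0 - L.getD (k + 1) 0| ≤ 0)) = true)) :=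
        fun hc => hS (key.mp hc)
      rw [if_neg (fun hc : 1 ≤ L.length ∧ pvSafe L = true => hS hc.2)]
      rcases not_and_or.mp hk with hA | hB
      · rw [not_not] at hA
        rw [if_pos hA]
      · rw [not_not] at hB
        by_cases hA : (0 + (cg : Int) ≠ (m : Int) ∧ 0 + (cl : Int) ≠ (m : Int))
        · rw [if_pos hA]
        · rw [if_neg hA, if_pos hB]

theorem double_test_eq (l : List Int) :
    double_test l = if goodB l then 1 else 0 := by
  simp only [double_test]
  rw [PySem.List.pyRange_zero_nat, List.foldl_map]
  rw [PySem.List.foldl_congr_mem _ _ (fun s (k : Nat) => s + pvTest (l.eraseIdx k)) 0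
    (by
      intro acc k hk
      rw [PySem.List.pop?_natCast l k (List.mem_range.mp hk)])]
  rw [PySem.List.foldl_add, zero_add]
  have hmap : (List.range l.length).map (fun k => pvTest (l.eraseIdx k))
      = (List.range l.length).map (fun k =>
          if (decide (2 ≤ l.length) && pvSafe (l.eraseIdx k)) = true then (1 : Int) else 0) := by
    apply List.map_congr_left
    intro k hk
    have hk' := List.mem_range.mp hk
    rw [pvTest_eq]
    have hlen : (l.eraseIdx k).length = l.length - 1 := by
      rw [List.length_eraseIdx, if_pos hk']
    by_cases h2 : 2 ≤ l.length
    · have : 1 ≤ (l.eraseIdx k).length := by omega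
      simp [this, h2]
    · have : ¬ 1 ≤ (l.eraseIdx k).length := by omega
      simp [this, h2]
  rw [hmap, PySem.List.sum_map_ite_one_zero]
  unfold goodB
  rcases Nat.eq_zero_or_pos (List.countP
      (fun k => decide (2 ≤ l.length) && pvSafe (l.eraseIdx k)) (List.range l.length)) with h0 | hpos
  · rw [h0]
    have hfalse : (decide (2 ≤ l.length) && (List.range l.length).any fun k => pvSafe (l.eraseIdx k)) = false := by
      rw [← Bool.not_eq_true]
      intro hc
      rw [Bool.and_eq_true, List.any_eq_true] at hc
      obtain ⟨hd, k, hk, hs⟩ := hc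
      exact absurd (by rw [Bool.and_eq_true]; exact ⟨hd, hs⟩)
        (List.countP_eq_zero.mp h0 k hk)
    rw [hfalse]
    norm_num
  · have hex : ∃ k ∈ List.range l.length,
        (decide (2 ≤ l.length) && pvSafe (l.eraseIdx k)) = true := by
      by_contra hno
      push_neg at hno
      have : List.countP (fun k => decide (2 ≤ l.length) && pvSafe (l.eraseIdx k)) (List.range l.length) = 0 :=
        List.countP_eq_zero.mpr (by intro a ha; simpa using hno a ha)
      omega
    obtain ⟨k, hk, hp⟩ := hex
    rw [Bool.and_eq_true] at hp
    have htrue : (decide (2 ≤ l.length) && (List.range l.length).any fun k => pvSafe (l.eraseIdx k)) = true := by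
      rw [Bool.and_eq_true, List.any_eq_true]
      exact ⟨hp.1, k, hk, hp.2⟩
    rw [htrue]
    have hcast : (0 : Int) < ((List.countP (fun k => decide (2 ≤ l.length) && pvSafe (l.eraseIdx k)) (List.range l.length) : Nat) : Int) := by
      exact_mod_cast hpos
    rw [if_pos hcast]
    norm_num

theorem cand_lt (s : Int) (l : List Int) (h1 : 1 ≤ l.length) :
    ∀ w ∈ (match pvFirstBad s l with
           | none => [l.length - 1]
           | some i => [i, i + 1]), w < l.length := by
  cases hf : pvFirstBad s l with
  | none => intro w hw; simp at hw; omega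
  | some i =>
    obtain ⟨hi, _⟩ := pvFirstBad_eq_some s l i hf
    intro w hw; simp at hw
    rcases hw with rfl | rfl <;> omega

theorem cand_complete (s : Int) (l : List Int) (k : Nat)
    (hsafe : PairsOK (pvGoodStep s) (l.eraseIdx k)) :
    ∃ w ∈ (match pvFirstBad s l with
           | none => [l.length - 1]
           | some i => [i, i + 1]), PairsOK (pvGoodStep s) (l.eraseIdx w) := by
  cases hf : pvFirstBad s l with
  | none =>
    exact ⟨l.length - 1, by simp, pairsOK_eraseIdx_last _ _ ((pvFirstBad_eq_none_iff s l).mp hf)⟩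
  | some i =>
    obtain ⟨hi, hbad⟩ := pvFirstBad_eq_some s l i hf
    by_cases hki : k = i
    · exact ⟨i, by simp, hki ▸ hsafe⟩
    · by_cases hki' : k = i + 1
      · exact ⟨i + 1, by simp, hki' ▸ hsafe⟩
      · exact absurd hsafe (bad_pair_survives _ _ _ _ hi hbad hki hki')

theorem double_test_alt_eq (l : List Int) :
    double_test_alt l = if goodB l then 1 else 0 := by
  simp only [double_test_alt]
  by_cases hn : l.length ≤ 1
  · rw [if_pos hn]
    have : goodB l = false := by
      unfold goodB
      have : ¬ (2 ≤ l.length) := by omega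
      simp [this]
    rw [this]
    norm_num
  · rw [if_neg hn]
    have h2 : 2 ≤ l.length := by omega
    have hiff : (((match pvFirstBad 1 l with
                   | none => [l.length - 1]
                   | some i => [i, i + 1]) ++
                  (match pvFirstBad (-1) l with
                   | none => [l.length - 1]
                   | some j => [j, j + 1])).any fun k => pvSafe (pvRemoved l k)) = true
        ↔ goodB l = true := by
      constructor
      · intro h
        rw [List.any_eq_true] at h
        obtain ⟨k, hk, hs⟩ := h
        rw [pvRemoved_eq] at hs
        have hklt : k < l.length := by
          rcases List.mem_append.mp hk with hk' | hk'
          · exact cand_lt 1 l (by omega) k hk'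
          · exact cand_lt (-1) l (by omega) k hk'
        unfold goodB
        rw [Bool.and_eq_true, List.any_eq_true]
        exact ⟨by simp [h2], k, List.mem_range.mpr hklt, hs⟩
      · intro h
        unfold goodB at h
        rw [Bool.and_eq_true, List.any_eq_true] at h
        obtain ⟨-, k, hk, hs⟩ := h
        rw [List.any_eq_true]
        rcases (pvSafe_iff _).mp hs with hp | hp
        · obtain ⟨w, hw, hws⟩ := cand_complete 1 l k hp
          refine ⟨w, List.mem_append.mpr (Or.inl hw), ?_⟩
          rw [pvRemoved_eq, pvSafe_iff]
          exact Or.inl hws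
        · obtain ⟨w, hw, hws⟩ := cand_complete (-1) l k hp
          refine ⟨w, List.mem_append.mpr (Or.inr hw), ?_⟩
          rw [pvRemoved_eq, pvSafe_iff]
          exact Or.inr hws
    by_cases hb : goodB l = true
    · rw [hb, if_pos (hiff.mpr hb), if_pos rfl]
    · rw [Bool.not_eq_true] at hb
      rw [hb]
      have : ¬ ((((match pvFirstBad 1 l with
                   | none => [l.length - 1]
                   | some i => [i, i + 1]) ++
                  (match pvFirstBad (-1) l with
                   | none => [l.length - 1]
                   | some j => [j, j + 1])).any fun k => pvSafe (pvRemoved l k)) = true) := by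
        intro hc
        rw [hiff] at hc
        simp [hc] at hb
      rw [if_neg this]
      norm_num

-- ===== VERDICT (by name: the statement is the Claim_ definition above) =====
theorem double_test_spec : Claim_equal_double_test := by
  intro array _
  unfold Spec_double_test
  rw [double_test_eq, double_test_alt_eq]
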